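-- pv_equiv track=rewrite | github.com/FeelingXD/algorithm | programers/121683.py | solution
-- ===== SOURCE A (Python) =====
-- from collections import defaultdict
--
-- def solution(input_string):
--     ans = ""
--     dic = defaultdict(lambda: -1)
--     check = defaultdict(lambda: True)
--     for i, c in enumerate(input_string):
--         if dic[c] == -1:  # 없을경우 최근인덱스 추가하기
--             dic[c] = i
--         else:
--             if dic[c] == i - 1:
--                 dic[c] = i
--             else:
--                 if check[c]:
--                     check[c] = False
--                     ans += c
--     ans = "".join(sorted(list(ans)))
--     return ans if ans else "N"
-- ===== SOURCE B (Python) =====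
-- from collections import Counter
--
-- def solution(input_string):
--     runs = [c for i, c in enumerate(input_string) if i == 0 or input_string[i - 1] != c]
--     repeated = sorted({c for c, n in Counter(runs).items() if n > 1})
--     return "".join(repeated) if repeated else "N"
-- ===== Notes on version B (the rewrite author's own statement) =====
-- stated objective: simpler
-- what changed: Replaces the index-tracking loop with two defaultdicts by collapsing adjacent runs via an enumerate comprehension and counting run keys with a Counter, keeping characters that start more than one run.
import Mathlib
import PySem

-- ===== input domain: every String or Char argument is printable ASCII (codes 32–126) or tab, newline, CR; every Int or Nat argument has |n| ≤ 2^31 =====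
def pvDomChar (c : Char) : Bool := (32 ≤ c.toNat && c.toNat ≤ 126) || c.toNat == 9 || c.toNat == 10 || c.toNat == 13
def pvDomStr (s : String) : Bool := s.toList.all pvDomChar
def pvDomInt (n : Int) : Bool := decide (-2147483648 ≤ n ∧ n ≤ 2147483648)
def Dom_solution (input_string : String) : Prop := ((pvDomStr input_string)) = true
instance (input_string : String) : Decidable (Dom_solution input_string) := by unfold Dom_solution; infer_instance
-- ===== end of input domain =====

-- B collapses adjacent runs with a comprehension and counts run keys with a Counter instead of
-- tracking last-seen indices and flags in two defaultdicts; objective: simpler, same cost.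

-- ===== PORT A =====
def solutionStep (st : List Char × PySem.Dict Char Int × PySem.Dict Char Bool)
    (p : Int × Char) : List Char × PySem.Dict Char Int × PySem.Dict Char Bool :=
  if st.2.1.getD p.2 (-1) == -1 then (st.1, st.2.1.insert p.2 p.1, st.2.2)
  else if st.2.1.getD p.2 (-1) == p.1 - 1 then (st.1, st.2.1.insert p.2 p.1, st.2.2)
  else if st.2.2.getD p.2 true then (st.1 ++ [p.2], st.2.1, st.2.2.insert p.2 false)
  else st

def solution (input_string : String) : String :=
  let st := (PySem.List.enumerate input_string.toList 0).foldl solutionStep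
      ([], PySem.Dict.empty, PySem.Dict.empty)
  let ans := PySem.List.sorted st.1 (fun x => x) false
  if ans = [] then "N" else String.mk ans

-- ===== PORT B =====
def solution_alt (input_string : String) : String :=
  let l := input_string.toList
  let runs := ((PySem.List.enumerate l 0).filter
      (fun p => p.1 == 0 || !(PySem.List.pyGetD l (p.1 - 1) ' ' == p.2))).map (·.2)
  let repeated := PySem.List.sorted
      (PySem.Set.ofList (((PySem.Dict.counter runs).items.filter
        (fun p => decide ((1 : Int) < p.2))).map (·.1)))
      (fun x => x) false
  if repeated = [] then "N" else String.mk repeated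

-- ===== PRECONDITION & SPEC =====
def Spec_solution (input_string : String) (out : String) : Prop := out = solution_alt input_string
instance (input_string : String) (out : String) : Decidable (Spec_solution input_string out) := by unfold Spec_solution; infer_instance

-- ===== CLAIM (what is proved, stated in full; the proofs are below) =====
def Claim_equal_solution : Prop := ∀ (input_string : String), Dom_solution input_string → Spec_solution input_string (solution input_string)

-- ===== LEMMAS AND PROOFS =====

/-- Tail of the run-collapsed sequence, given the previous character. -/
def tcol (prev : Char) : List Char → List Char
  | [] => []
  | c :: r => if c = prev then tcol c r else c :: tcol c r

/-- The run-length-collapsed sequence: one character per maximal run. -/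
def col : List Char → List Char
  | [] => []
  | a :: l => a :: tcol a l

lemma tcol_append (l : List Char) (prev x : Char) :
    tcol prev (l ++ [x]) = tcol prev l ++ (if l.getLastD prev = x then [] else [x]) := by
  induction l generalizing prev with
  | nil => simp [tcol]; split <;> simp_all [eq_comm]
  | cons c r ih => simp only [List.cons_append, tcol, ih, List.getLastD_cons]; split <;> simp

lemma col_append (pre : List Char) (x : Char) :
    col (pre ++ [x]) = col pre ++ (if pre.getLast? = some x then [] else [x]) := by
  cases pre with
  | nil => simp [col, tcol]
  | cons a l => simp [col, tcol_append, List.getLast?_cons]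

lemma mem_tcol_of_mem {c prev : Char} {l : List Char} (h : c ∈ l) :
    c = prev ∨ c ∈ tcol prev l := by
  induction l generalizing prev with
  | nil => simp at h
  | cons d r ih =>
    rcases List.mem_cons.mp h with rfl | hr
    · by_cases hd : c = prev
      · exact Or.inl hd
      · right; simp only [tcol]; split
        · rename_i he; exact absurd he hd
        · exact List.mem_cons_self
    · rcases ih (prev := d) hr with rfl | ht
      · simp only [tcol]; split
        · rename_i he; exact Or.inl he
        · exact Or.inr List.mem_cons_self
      · right; simp only [tcol]; split
        · exact ht
        · exact List.mem_cons_of_mem _ ht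

lemma mem_of_mem_tcol {c prev : Char} {l : List Char} (h : c ∈ tcol prev l) : c ∈ l := by
  induction l generalizing prev with
  | nil => simp [tcol] at h
  | cons d r ih =>
    simp only [tcol] at h
    split at h
    · exact List.mem_cons_of_mem _ (ih h)
    · rcases List.mem_cons.mp h with rfl | hr
      · exact List.mem_cons_self
      · exact List.mem_cons_of_mem _ (ih hr)

lemma mem_col {c : Char} {l : List Char} : c ∈ col l ↔ c ∈ l := by
  cases l with
  | nil => simp [col]
  | cons a r =>
    simp only [col, List.mem_cons]
    constructor
    · rintro (rfl | h)
      · exact Or.inl rfl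
      · exact Or.inr (mem_of_mem_tcol h)
    · rintro (rfl | h)
      · exact Or.inl rfl
      · rcases mem_tcol_of_mem (prev := a) h with rfl | ht
        · exact Or.inl rfl
        · exact Or.inr ht

/-- Invariant of A's loop after processing the prefix `pre`. -/
def LoopInv (pre ans : List Char) (dic : PySem.Dict Char Int) (check : PySem.Dict Char Bool) : Prop :=
  ans.Nodup ∧
  (∀ c, c ∈ ans ↔ 2 ≤ (col pre).count c) ∧
  (∀ c, check.getD c true = false ↔ c ∈ ans) ∧
  (∀ c, dic.getD c (-1) = -1 ↔ c ∉ pre) ∧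
  (∀ c, c ∈ pre → (col pre).count c < 2 →
      0 ≤ dic.getD c (-1) ∧ dic.getD c (-1) ≤ (pre.length : Int) - 1 ∧
      (dic.getD c (-1) = (pre.length : Int) - 1 ↔ pre.getLast? = some c)) ∧
  (∀ c, 2 ≤ (col pre).count c → 0 ≤ dic.getD c (-1) ∧ dic.getD c (-1) ≤ (pre.length : Int) - 3)

lemma count_app (L : List Char) (x d : Char) :
    (L ++ [x]).count d = L.count d + (if d = x then 1 else 0) := by
  by_cases h : d = x
  · simp [List.count_append, h]
  · simp [List.count_append, h, Ne.symm h]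

lemma unf_extend {dic : PySem.Dict Char Int} {pre : List Char} {x c : Char} (hc : c ≠ x)
    (h0 : 0 ≤ dic.getD c (-1)) (h1 : dic.getD c (-1) ≤ (pre.length : Int) - 1) :
    0 ≤ dic.getD c (-1) ∧ dic.getD c (-1) ≤ ((pre ++ [x]).length : Int) - 1 ∧
      (dic.getD c (-1) = ((pre ++ [x]).length : Int) - 1 ↔ (pre ++ [x]).getLast? = some c) := by
  have hlen : ((pre ++ [x]).length : Int) = (pre.length : Int) + 1 := by simp
  refine ⟨h0, by omega, ?_⟩
  rw [List.getLast?_concat]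
  constructor
  · intro he; exfalso; omega
  · intro hsome; exact absurd (Option.some.inj hsome).symm hc

lemma unf_self (pre : List Char) (x : Char) :
    0 ≤ ((pre.length : Int)) ∧ (pre.length : Int) ≤ ((pre ++ [x]).length : Int) - 1 ∧
      ((pre.length : Int) = ((pre ++ [x]).length : Int) - 1 ↔ (pre ++ [x]).getLast? = some x) := by
  have hlen : ((pre ++ [x]).length : Int) = (pre.length : Int) + 1 := by simp
  refine ⟨by omega, by omega, ?_⟩
  rw [List.getLast?_concat]
  exact ⟨fun _ => rfl, fun _ => by omega⟩

lemma inv_step {pre ans : List Char} {dic : PySem.Dict Char Int} {check : PySem.Dict Char Bool}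
    (h : LoopInv pre ans dic check) (x : Char) :
    LoopInv (pre ++ [x]) (solutionStep (ans, dic, check) ((pre.length : Int), x)).1
      (solutionStep (ans, dic, check) ((pre.length : Int), x)).2.1
      (solutionStep (ans, dic, check) ((pre.length : Int), x)).2.2 := by
  obtain ⟨hnd, hans, hchk, hdic, hunf, hflg⟩ := h
  have hlast : (pre ++ [x]).getLast? = some x := List.getLast?_concat
  have hlen : ((pre ++ [x]).length : Int) = (pre.length : Int) + 1 := by simp
  unfold LoopInv solutionStep
  dsimp only
  split_ifs with h1 h2 h3
  all_goals dsimp only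
  · -- branch 1: first occurrence of x
    simp only [beq_iff_eq] at h1
    have hxp : x ∉ pre := (hdic x).mp h1
    have hnl : pre.getLast? ≠ some x := fun hl => hxp (List.mem_of_getLast? hl)
    have hcol : col (pre ++ [x]) = col pre ++ [x] := by rw [col_append, if_neg hnl]
    have hcx : (col pre).count x = 0 :=
      List.count_eq_zero.mpr (fun hm => hxp (mem_col.mp hm))
    have hcnt : ∀ c, (col (pre ++ [x])).count c
        = (col pre).count c + (if c = x then 1 else 0) := fun c => by rw [hcol, count_app]
    refine ⟨hnd, ?_, hchk, ?_, ?_, ?_⟩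
    · intro c
      by_cases hc : c = x
      · subst hc; rw [hans c, hcnt c, if_pos rfl, hcx]; omega
      · rw [hans c, hcnt c, if_neg hc]; omega
    · intro c
      rw [PySem.Dict.getD_insert]
      by_cases hc : c = x
      · subst hc
        rw [if_pos rfl]
        simp only [List.mem_append, List.mem_singleton, or_true, not_true_eq_false, iff_false]
        omega
      · rw [if_neg hc, hdic c]
        simp [List.mem_append, hc]
    · intro c hm hlt
      rw [PySem.Dict.getD_insert]
      by_cases hc : c = x
      · subst hc; rw [if_pos rfl]; exact unf_self pre c
      · rw [if_neg hc]
        have hcp : c ∈ pre := by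
          rcases List.mem_append.mp hm with h' | h'
          · exact h'
          · exact absurd (List.mem_singleton.mp h') hc
        have hlt' : (col pre).count c < 2 := by
          rw [hcnt c, if_neg hc] at hlt; omega
        obtain ⟨hb0, hb1, _⟩ := hunf c hcp hlt'
        exact unf_extend hc hb0 hb1
    · intro c h2c
      by_cases hc : c = x
      · subst hc; rw [hcnt c, if_pos rfl, hcx] at h2c; omega
      · rw [hcnt c, if_neg hc] at h2c
        rw [PySem.Dict.getD_insert, if_neg hc]
        obtain ⟨hb0, hb1⟩ := hflg c (by omega)
        exact ⟨hb0, by omega⟩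
  · -- branch 2: run of x continues
    simp only [beq_iff_eq] at h1 h2
    have hxp : x ∈ pre := by by_contra hn; exact h1 ((hdic x).mpr hn)
    have hnf : (col pre).count x < 2 := by
      by_contra hn
      obtain ⟨_, hb1⟩ := hflg x (le_of_not_gt hn)
      omega
    obtain ⟨hb0, hb1, hiff⟩ := hunf x hxp hnf
    have hlx : pre.getLast? = some x := hiff.mp h2
    have hcol : col (pre ++ [x]) = col pre := by rw [col_append, if_pos hlx, List.append_nil]
    refine ⟨hnd, ?_, hchk, ?_, ?_, ?_⟩
    · intro c; rw [hcol]; exact hans c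
    · intro c
      rw [PySem.Dict.getD_insert]
      by_cases hc : c = x
      · subst hc
        rw [if_pos rfl]
        simp only [List.mem_append, List.mem_singleton, or_true, not_true_eq_false, iff_false]
        omega
      · rw [if_neg hc, hdic c]
        simp [List.mem_append, hc]
    · intro c hm hlt
      rw [PySem.Dict.getD_insert]
      by_cases hc : c = x
      · subst hc; rw [if_pos rfl]; exact unf_self pre c
      · rw [if_neg hc]
        have hcp : c ∈ pre := by
          rcases List.mem_append.mp hm with h' | h'
          · exact h'
          · exact absurd (List.mem_singleton.mp h') hc
        rw [hcol] at hlt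
        obtain ⟨hc0, hc1, _⟩ := hunf c hcp hlt
        exact unf_extend hc hc0 hc1
    · intro c h2c
      rw [hcol] at h2c
      by_cases hc : c = x
      · subst hc; omega
      · rw [PySem.Dict.getD_insert, if_neg hc]
        obtain ⟨hc0, hc1⟩ := hflg c h2c
        exact ⟨hc0, by omega⟩
  · -- branch 3: x flagged now
    simp only [beq_iff_eq] at h1 h2
    have hxp : x ∈ pre := by by_contra hn; exact h1 ((hdic x).mpr hn)
    have hxa : x ∉ ans := fun hm => by simp [(hchk x).mpr hm] at h3
    have hlt : (col pre).count x < 2 := by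
      by_contra hn
      exact hxa ((hans x).mpr (le_of_not_gt hn))
    obtain ⟨hb0, hb1, hiff⟩ := hunf x hxp hlt
    have hnl : pre.getLast? ≠ some x := fun hl => h2 (hiff.mpr hl)
    have hcol : col (pre ++ [x]) = col pre ++ [x] := by rw [col_append, if_neg hnl]
    have hpos : 0 < (col pre).count x := List.count_pos_iff.mpr (mem_col.mpr hxp)
    have hcnt : ∀ c, (col (pre ++ [x])).count c
        = (col pre).count c + (if c = x then 1 else 0) := fun c => by rw [hcol, count_app]
    refine ⟨?_, ?_, ?_, ?_, ?_, ?_⟩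
    · simp [List.nodup_append, hnd]
      exact fun a ha hax => hxa (hax ▸ ha)
    · intro c
      rw [hcnt c]
      by_cases hc : c = x
      · subst hc
        rw [if_pos rfl]
        constructor
        · intro _; omega
        · intro _; exact List.mem_append.mpr (Or.inr List.mem_cons_self)
      · rw [if_neg hc, show (c ∈ ans ++ [x]) ↔ c ∈ ans from by simp [hc], hans c]
        omega
    · intro c
      rw [PySem.Dict.getD_insert]
      by_cases hc : c = x
      · subst hc
        rw [if_pos rfl]
        simp
      · rw [if_neg hc, hchk c]
        simp [List.mem_append, hc]
    · intro c
      by_cases hc : c = x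
      · subst hc
        constructor
        · intro he; exact absurd he h1
        · intro hnm; exact absurd (List.mem_append.mpr (Or.inr List.mem_cons_self)) hnm
      · rw [hdic c]
        simp [List.mem_append, hc]
    · intro c hm hlt2
      by_cases hc : c = x
      · subst hc; rw [hcnt c, if_pos rfl] at hlt2; omega
      · have hcp : c ∈ pre := by
          rcases List.mem_append.mp hm with h' | h'
          · exact h'
          · exact absurd (List.mem_singleton.mp h') hc
        rw [hcnt c, if_neg hc] at hlt2
        obtain ⟨hc0, hc1, _⟩ := hunf c hcp (by omega)
        exact unf_extend hc hc0 hc1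
    · intro c h2c
      by_cases hc : c = x
      · rw [hc]
        refine ⟨hb0, ?_⟩
        have hne := h2
        omega
      · rw [hcnt c, if_neg hc] at h2c
        obtain ⟨hc0, hc1⟩ := hflg c (by omega)
        exact ⟨hc0, by omega⟩
  · -- branch 4: x already flagged
    simp only [beq_iff_eq] at h1 h2
    rw [Bool.not_eq_true] at h3
    have hxa : x ∈ ans := (hchk x).mp h3
    have hfx : 2 ≤ (col pre).count x := (hans x).mp hxa
    obtain ⟨hb0, hb1⟩ := hflg x hfx
    have hcge : 2 ≤ (col (pre ++ [x])).count x := by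
      rw [col_append]
      split_ifs
      · simpa using hfx
      · rw [count_app, if_pos rfl]; omega
    have hcne : ∀ c, c ≠ x → (col (pre ++ [x])).count c = (col pre).count c := by
      intro c hc
      rw [col_append]
      split_ifs
      · simp
      · rw [count_app, if_neg hc]; omega
    refine ⟨hnd, ?_, hchk, ?_, ?_, ?_⟩
    · intro c
      by_cases hc : c = x
      · subst hc; exact iff_of_true hxa hcge
      · rw [hcne c hc]; exact hans c
    · intro c
      by_cases hc : c = x
      · subst hc
        constructor
        · intro he; exact absurd he h1
        · intro hnm; exact absurd (List.mem_append.mpr (Or.inr List.mem_cons_self)) hnm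
      · rw [hdic c]
        simp [List.mem_append, hc]
    · intro c hm hlt2
      by_cases hc : c = x
      · subst hc; omega
      · have hcp : c ∈ pre := by
          rcases List.mem_append.mp hm with h' | h'
          · exact h'
          · exact absurd (List.mem_singleton.mp h') hc
        rw [hcne c hc] at hlt2
        obtain ⟨hc0, hc1, _⟩ := hunf c hcp hlt2
        exact unf_extend hc hc0 hc1
    · intro c h2c
      by_cases hc : c = x
      · subst hc; exact ⟨hb0, by omega⟩
      · rw [hcne c hc] at h2c
        obtain ⟨hc0, hc1⟩ := hflg c h2c
        exact ⟨hc0, by omega⟩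

lemma runs_eq : ∀ (rest pre : List Char) (prev : Char), pre.getLast? = some prev →
    (((PySem.List.enumerate rest (pre.length : Int)).filter
      (fun p => p.1 == 0 || !(PySem.List.pyGetD (pre ++ rest) (p.1 - 1) ' ' == p.2))).map (·.2))
    = tcol prev rest := by
  intro rest
  induction rest with
  | nil => intro pre prev h; simp [PySem.List.enumerate_nil, tcol]
  | cons c r ih =>
    intro pre prev h
    have hpre : pre ≠ [] := by rintro rfl; simp at h
    have hlen : 1 ≤ pre.length := List.length_pos_of_ne_nil hpre
    have hc0 : (((pre.length : Int)) == 0) = false := by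
      simp only [beq_eq_false_iff_ne, ne_eq]; omega
    have hget : PySem.List.pyGetD (pre ++ c :: r) ((pre.length : Int) - 1) ' ' = prev := by
      have hcast : ((pre.length : Int) - 1) = ((pre.length - 1 : Nat) : Int) := by omega
      rw [hcast, PySem.List.pyGetD_natCast]
      rw [List.getD_eq_getElem?_getD, List.getElem?_append_left (by omega)]
      rw [← List.getLast?_eq_getElem?, h]
      rfl
    rw [PySem.List.enumerate_cons, List.filter_cons]
    have hrec : (PySem.List.enumerate r ((pre.length : Int) + 1)).filter
        (fun p => p.1 == 0 || !(PySem.List.pyGetD (pre ++ c :: r) (p.1 - 1) ' ' == p.2))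
        = (PySem.List.enumerate r (((pre ++ [c]).length : Int))).filter
        (fun p => p.1 == 0 || !(PySem.List.pyGetD ((pre ++ [c]) ++ r) (p.1 - 1) ' ' == p.2)) := by
      simp [List.length_append, List.append_assoc]
    by_cases hcp : c = prev
    · have hcond : ((((pre.length : Int)) == 0) || !(PySem.List.pyGetD (pre ++ c :: r)
          ((pre.length : Int) - 1) ' ' == c)) = false := by
        rw [hc0, hget]; subst hcp; simp
      rw [hcond]
      simp only [Bool.false_eq_true, if_false, tcol, if_pos hcp]
      rw [hrec]
      exact ih (pre ++ [c]) c List.getLast?_concat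
    · have hcond : ((((pre.length : Int)) == 0) || !(PySem.List.pyGetD (pre ++ c :: r)
          ((pre.length : Int) - 1) ' ' == c)) = true := by
        rw [hc0, hget]
        simp [Ne.symm hcp]
      rw [hcond]
      simp only [if_true, List.map_cons, tcol, if_neg hcp]
      rw [hrec]
      rw [ih (pre ++ [c]) c List.getLast?_concat]

lemma runs_top (l : List Char) :
    (((PySem.List.enumerate l 0).filter
      (fun p => p.1 == 0 || !(PySem.List.pyGetD l (p.1 - 1) ' ' == p.2))).map (·.2)) = col l := by
  cases l with
  | nil => simp [PySem.List.enumerate_nil, col]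
  | cons a r =>
    rw [PySem.List.enumerate_cons, List.filter_cons]
    have h0 : (((0 : Int) == 0) || !(PySem.List.pyGetD (a :: r) ((0 : Int) - 1) ' ' == a)) = true := by
      simp
    rw [h0]
    simp only [if_true, List.map_cons, col]
    have := runs_eq r [a] a rfl
    norm_num at this
    rw [show ((0 : Int) + 1) = (1 : Int) by ring, this]

lemma inv_nil : LoopInv [] [] PySem.Dict.empty PySem.Dict.empty := by
  refine ⟨List.nodup_nil, ?_, ?_, ?_, ?_, ?_⟩ <;>
    intro c <;> simp [col, PySem.Dict.getD_empty]

lemma main_fold : ∀ (rest pre ans : List Char) (dic : PySem.Dict Char Int)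
    (check : PySem.Dict Char Bool), LoopInv pre ans dic check →
    (((PySem.List.enumerate rest (pre.length : Int)).foldl solutionStep (ans, dic, check)).1.Nodup ∧
     ∀ c, c ∈ ((PySem.List.enumerate rest (pre.length : Int)).foldl solutionStep (ans, dic, check)).1 ↔
       2 ≤ (col (pre ++ rest)).count c) := by
  intro rest
  induction rest with
  | nil =>
    intro pre ans dic check h
    simpa [PySem.List.enumerate_nil] using ⟨h.1, h.2.1⟩
  | cons x r ih =>
    intro pre ans dic check h
    rw [PySem.List.enumerate_cons, List.foldl_cons]
    have hstep := inv_step h x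
    have := ih (pre ++ [x]) _ _ _ hstep
    simp only [List.length_append, List.length_cons, List.length_nil, Nat.cast_add,
      Nat.cast_one, List.append_assoc, List.singleton_append] at this
    convert this using 3

-- ===== VERDICT (by name: the statement is the Claim_ definition above) =====
lemma blist_char (runs : List Char) :
    (PySem.Set.ofList (((PySem.Dict.counter runs).items.filter
        (fun p => decide ((1 : Int) < p.2))).map (·.1)))
    = (PySem.Set.ofList runs).filter (fun k => decide (2 ≤ runs.count k)) := by
  rw [PySem.Dict.items_counter, List.filter_map, List.map_map]
  have hmap : ((fun p => (p.1 : Char)) ∘ fun k => (k, (runs.count k : Int))) = id := rfl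
  have hfil : ((fun p => decide ((1 : Int) < p.2)) ∘ (fun k => ((k : Char), (runs.count k : Int))))
      = fun k => decide (2 ≤ runs.count k) := by
    funext k; simp; omega
  rw [hfil, hmap, List.map_id]
  exact PySem.Set.ofList_eq_self_of_nodup _ ((PySem.Set.nodup_ofList runs).filter _)

theorem solution_spec : Claim_equal_solution := by
  intro s _
  unfold Spec_solution solution solution_alt
  have hruns := runs_top s.toList
  dsimp only
  rw [hruns, blist_char]
  have hA := main_fold s.toList [] [] PySem.Dict.empty PySem.Dict.empty inv_nil
  norm_num at hA
  have hndB : ((PySem.Set.ofList (col s.toList)).filter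
      (fun k => decide (2 ≤ (col s.toList).count k))).Nodup :=
    (PySem.Set.nodup_ofList _).filter _
  have hmemB : ∀ c, c ∈ (PySem.Set.ofList (col s.toList)).filter
      (fun k => decide (2 ≤ (col s.toList).count k)) ↔ 2 ≤ (col s.toList).count c := by
    intro c
    rw [List.mem_filter, PySem.Set.mem_ofList]
    constructor
    · rintro ⟨_, h⟩; simpa using h
    · intro h
      exact ⟨List.count_pos_iff.mp (by omega), by simpa using h⟩
  have hperm : ((PySem.List.enumerate s.toList 0).foldl solutionStep
      ([], PySem.Dict.empty, PySem.Dict.empty)).1.Perm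
      ((PySem.Set.ofList (col s.toList)).filter (fun k => decide (2 ≤ (col s.toList).count k))) := by
    rw [List.perm_ext_iff_of_nodup hA.1 hndB]
    intro c
    rw [hA.2 c, hmemB c]
  rw [(PySem.List.sorted_id_eq_sorted_id_iff_perm _ _).mpr hperm]
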